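-- pv_equiv track=rewrite | github.com/TheThingGoesSkra/nmap2md_for_zettler | nmap2md.py | remove_code_blocks
-- ===== SOURCE A (Python) =====
-- def remove_code_blocks(content):
--     content_cleaned = []
--     code_block = False
--     for x in content:
--         # detect code blocks, act accordingly
--         if x[:3] == '```':
--             code_block = not code_block
--         elif not code_block:
--             content_cleaned.append(x)
--
--     return content_cleaned
-- ===== SOURCE B (Python) =====
-- def remove_code_blocks(content):
--     # Segment-based: copy the stretch before a fence, then skip to the
--     # matching closing fence and repeat; an unclosed block is discarded.
--     out = []
--     i = 0
--     n = len(content)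
--     while True:
--         j = i
--         while j < n and content[j][:3] != '```':
--             j += 1
--         out.extend(content[i:j])      # segment outside any code block
--         if j == n:
--             return out
--         j += 1                        # skip the opening fence
--         while j < n and content[j][:3] != '```':
--             j += 1                    # skip the block's body
--         if j == n:
--             return out                # unclosed block: drop it
--         i = j + 1                     # skip the closing fence
-- ===== Notes on version B (the rewrite author's own statement) =====
-- stated objective: alternative
-- what changed: Replaces the single pass with a toggled boolean flag by a segment-splitting scan: repeatedly copy the stretch of lines before the next fence, then skip forward to the matching closing fence, discarding fences, block bodies and a final unclosed block.
import Mathlib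
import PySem

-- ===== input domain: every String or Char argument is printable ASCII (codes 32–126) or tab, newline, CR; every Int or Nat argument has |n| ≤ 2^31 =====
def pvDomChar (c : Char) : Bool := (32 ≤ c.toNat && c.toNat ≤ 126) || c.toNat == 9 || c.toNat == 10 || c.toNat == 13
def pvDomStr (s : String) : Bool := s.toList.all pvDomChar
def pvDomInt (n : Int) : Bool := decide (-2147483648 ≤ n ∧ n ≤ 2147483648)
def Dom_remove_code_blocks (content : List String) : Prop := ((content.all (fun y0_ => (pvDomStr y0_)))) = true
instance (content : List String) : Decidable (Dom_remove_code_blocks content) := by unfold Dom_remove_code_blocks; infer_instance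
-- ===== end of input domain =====

-- B rebuilds the result from fence-delimited segments instead of A's toggled flag; same cost, different decomposition.

-- ===== PORT A =====
-- x[:3] == '```'
def pvFence (x : String) : Bool := PySem.Str.slice x none (some 3) == "```"

def remove_code_blocks (content : List String) : List String :=
  (content.foldl (fun (st : List String × Bool) x =>
      if pvFence x then (st.1, !st.2)
      else if !st.2 then (st.1 ++ [x], st.2)
      else st)
    ([], false)).1

-- ===== PORT B =====
-- each iteration of Source B's outer loop: copy the pre-fence segment, skip the block, recurse
def remove_code_blocks_alt (content : List String) : List String :=
  let pre := content.takeWhile (fun x => !pvFence x)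
  match h : content.dropWhile (fun x => !pvFence x) with
  | [] => pre
  | _ :: tail =>
    match h2 : tail.dropWhile (fun x => !pvFence x) with
    | [] => pre
    | _ :: tail2 => pre ++ remove_code_blocks_alt tail2
termination_by content.length
decreasing_by
  have h1 : (content.dropWhile (fun x => !pvFence x)).length ≤ content.length :=
    List.length_dropWhile_le _ _
  have h3 : (tail.dropWhile (fun x => !pvFence x)).length ≤ tail.length :=
    List.length_dropWhile_le _ _
  rw [h] at h1; rw [h2] at h3
  simp at h1 h3; omega

-- ===== PRECONDITION & SPEC =====
def Spec_remove_code_blocks (content : List String) (out : List String) : Prop := out = remove_code_blocks_alt content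
instance (content : List String) (out : List String) : Decidable (Spec_remove_code_blocks content out) := by unfold Spec_remove_code_blocks; infer_instance

-- ===== CLAIM (what is proved, stated in full; the proofs are below) =====
def Claim_equal_remove_code_blocks : Prop := ∀ (content : List String), Dom_remove_code_blocks content → Spec_remove_code_blocks content (remove_code_blocks content)

-- ===== LEMMAS AND PROOFS =====

-- A's loop as a structural recursion on the remaining lines and the flag
def goA : Bool → List String → List String
  | _, [] => []
  | b, x :: xs =>
    if pvFence x then goA (!b) xs
    else if b then goA b xs
    else x :: goA b xs

theorem foldl_goA (xs : List String) (acc : List String) (b : Bool) :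
    (xs.foldl (fun (st : List String × Bool) x =>
      if pvFence x then (st.1, !st.2)
      else if !st.2 then (st.1 ++ [x], st.2)
      else st) (acc, b)).1 = acc ++ goA b xs := by
  induction xs generalizing acc b with
  | nil => simp [goA]
  | cons x xs ih =>
    simp only [List.foldl_cons, goA]
    by_cases hf : pvFence x
    · simp only [hf, if_true]
      exact ih acc (!b)
    · cases b
      · simp only [hf, if_false, Bool.not_false, if_true, Bool.false_eq_true]
        rw [ih]
        simp
      · simp only [hf, if_false, Bool.not_true, Bool.false_eq_true]
        exact ih acc true

theorem goA_true (xs : List String) :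
    goA true xs =
      match xs.dropWhile (fun x => !pvFence x) with
      | [] => []
      | _ :: t => goA false t := by
  induction xs with
  | nil => simp [goA]
  | cons x xs ih =>
    by_cases hf : pvFence x
    · simp [goA, hf, List.dropWhile_cons, Bool.not_eq_true']
    · simp [goA, hf, List.dropWhile_cons, ih]

theorem goA_false_split (xs : List String) :
    goA false xs =
      xs.takeWhile (fun x => !pvFence x) ++
        (match xs.dropWhile (fun x => !pvFence x) with
         | [] => []
         | _ :: t => goA true t) := by
  induction xs with
  | nil => simp [goA]
  | cons x xs ih =>
    by_cases hf : pvFence x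
    · simp [goA, hf, List.takeWhile_cons, List.dropWhile_cons, Bool.not_eq_true']
    · simp [goA, hf, List.takeWhile_cons, List.dropWhile_cons, ih]

theorem goA_false_bounded : ∀ (n : Nat) (xs : List String), xs.length ≤ n →
    goA false xs = remove_code_blocks_alt xs := by
  intro n
  induction n with
  | zero =>
    intro xs hxs
    have : xs = [] := List.eq_nil_of_length_eq_zero (Nat.le_zero.mp hxs)
    subst this
    rw [remove_code_blocks_alt]; simp [goA]
  | succ n ih =>
    intro xs hxs
    rw [goA_false_split, remove_code_blocks_alt]
    cases h : xs.dropWhile (fun x => !pvFence x) with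
    | nil => simp
    | cons hd tail =>
      simp only []
      rw [goA_true]
      cases h2 : tail.dropWhile (fun x => !pvFence x) with
      | nil => simp
      | cons hd2 tail2 =>
        simp only []
        congr 1
        apply ih
        have h1 : (xs.dropWhile (fun x => !pvFence x)).length ≤ xs.length :=
          List.length_dropWhile_le _ _
        have h3 : (tail.dropWhile (fun x => !pvFence x)).length ≤ tail.length :=
          List.length_dropWhile_le _ _
        rw [h] at h1; rw [h2] at h3
        simp at h1 h3; omega

-- ===== VERDICT (by name: the statement is the Claim_ definition above) =====
theorem remove_code_blocks_spec : Claim_equal_remove_code_blocks := by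
  intro content _
  unfold Spec_remove_code_blocks remove_code_blocks
  rw [foldl_goA, goA_false_bounded content.length content (le_refl _)]
  simp
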